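-- pv_equiv track=rewrite | github.com/LWLeijten/AdventofCode2020 | solutions/day21/day21.py | find_safe_ingredients
-- ===== SOURCE A (Python) =====
-- def find_safe_ingredients(allergies, ingredients_dict):
--     """ Returns the amount of occurences of safe ingredients. """
--     all_possible_allergents = allergies.values()
--     ingredients = set()
--     # Unpack all the ingredients in the allergies dict
--     for l in all_possible_allergents:
--         for elem in l:
--             ingredients.add(elem)
--     ingredients = list(ingredients)
--     # Count the occurences of ingredients not in any allergy list
--     count = 0
--     for k, v in ingredients_dict.items():
--         if k not in ingredients:
--             count += int(v)
--     return count
-- ===== SOURCE B (Python) =====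
-- def find_safe_ingredients(allergies, ingredients_dict):
--     """ Returns the amount of occurences of safe ingredients. """
--     return sum(int(v) for k, v in ingredients_dict.items()
--                if not any(k in l for l in allergies.values()))
-- ===== Notes on version B (the rewrite author's own statement) =====
-- stated objective: idiomatic
-- what changed: B drops A's precomputed set of allergen ingredients and instead sums v directly over ingredients_dict.items(), testing each key on the fly with any(k in l for l in allergies.values()).
import Mathlib
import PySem

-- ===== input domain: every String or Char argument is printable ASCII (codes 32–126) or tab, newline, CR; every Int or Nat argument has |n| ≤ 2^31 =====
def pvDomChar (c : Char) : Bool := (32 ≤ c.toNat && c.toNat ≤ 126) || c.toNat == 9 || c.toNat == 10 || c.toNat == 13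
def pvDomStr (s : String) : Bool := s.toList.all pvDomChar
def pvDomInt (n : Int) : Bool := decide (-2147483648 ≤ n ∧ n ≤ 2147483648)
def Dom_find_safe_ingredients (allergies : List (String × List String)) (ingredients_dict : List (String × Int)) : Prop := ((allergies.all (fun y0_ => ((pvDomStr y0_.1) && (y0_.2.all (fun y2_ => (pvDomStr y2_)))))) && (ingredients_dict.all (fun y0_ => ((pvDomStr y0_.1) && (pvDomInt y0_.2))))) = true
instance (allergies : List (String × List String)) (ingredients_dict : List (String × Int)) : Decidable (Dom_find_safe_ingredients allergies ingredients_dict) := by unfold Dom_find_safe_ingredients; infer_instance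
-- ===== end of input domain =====

-- B sums the values directly, testing each key against the allergen lists on the fly,
-- instead of A's precomputed set of all allergen ingredients (objective: idiomatic).

-- ===== PORT A =====
def find_safe_ingredients (allergies : List (String × List String)) (ingredients_dict : List (String × Int)) : Int :=
  -- ingredients = set(); for l in allergies.values(): for elem in l: ingredients.add(elem)
  let ingredients : PySem.Set String :=
    allergies.foldl (fun s p => p.2.foldl (fun s e => PySem.Set.add s e) s) PySem.Set.empty
  -- ingredients = list(ingredients): only membership is used below, so the Set's element
  -- list is exact here (result is independent of hash iteration order)
  -- count = 0; for k, v in ingredients_dict.items(): if k not in ingredients: count += int(v)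
  ingredients_dict.foldl
    (fun count kv => if ¬ (kv.1 ∈ ingredients) then count + kv.2 else count) 0

-- ===== PORT B =====
def find_safe_ingredients_alt (allergies : List (String × List String)) (ingredients_dict : List (String × Int)) : Int :=
  -- sum(int(v) for k, v in ingredients_dict.items() if not any(k in l for l in allergies.values()))
  ingredients_dict.foldl
    (fun total kv => if ¬ (allergies.any (fun p => p.2.contains kv.1)) then total + kv.2 else total) 0

-- ===== PRECONDITION & SPEC =====
def Spec_find_safe_ingredients (allergies : List (String × List String)) (ingredients_dict : List (String × Int)) (out : Int) : Prop := out = find_safe_ingredients_alt allergies ingredients_dict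
instance (allergies : List (String × List String)) (ingredients_dict : List (String × Int)) (out : Int) : Decidable (Spec_find_safe_ingredients allergies ingredients_dict out) := by unfold Spec_find_safe_ingredients; infer_instance

-- ===== CLAIM (what is proved, stated in full; the proofs are below) =====
def Claim_equal_find_safe_ingredients : Prop := ∀ (allergies : List (String × List String)) (ingredients_dict : List (String × Int)), Dom_find_safe_ingredients allergies ingredients_dict → Spec_find_safe_ingredients allergies ingredients_dict (find_safe_ingredients allergies ingredients_dict)

-- ===== LEMMAS AND PROOFS =====

-- membership in A's accumulated set ↔ membership in some allergen list
theorem pv_mem_nested_foldl (allergies : List (String × List String)) (s : PySem.Set String) (k : String) :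
    (k ∈ allergies.foldl (fun s p => p.2.foldl (fun s e => PySem.Set.add s e) s) s) ↔
      (k ∈ s ∨ ∃ p ∈ allergies, k ∈ p.2) := by
  induction allergies generalizing s with
  | nil => simp
  | cons hd tl ih =>
    simp only [List.foldl_cons, ih]
    have : (k ∈ hd.2.foldl (fun s e => PySem.Set.add s e) s) ↔ (k ∈ s ∨ k ∈ hd.2) := by
      simpa using PySem.Set.mem_foldl_add (l := hd.2) (f := fun e => e) (s := s) (y := k)
    rw [this]
    constructor
    · rintro ((h | h) | ⟨p, hp, hk⟩)
      · exact Or.inl h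
      · exact Or.inr ⟨hd, by simp, h⟩
      · exact Or.inr ⟨p, by simp [hp], hk⟩
    · rintro (h | ⟨p, hp, hk⟩)
      · exact Or.inl (Or.inl h)
      · rcases List.mem_cons.mp hp with rfl | hp
        · exact Or.inl (Or.inr hk)
        · exact Or.inr ⟨p, hp, hk⟩

theorem find_safe_ingredients_spec : Claim_equal_find_safe_ingredients := by
  intro allergies ingredients_dict _
  unfold Spec_find_safe_ingredients find_safe_ingredients find_safe_ingredients_alt
  apply PySem.List.foldl_congr_mem
  intro count kv _
  have hmem : (kv.1 ∈ allergies.foldl (fun s p => p.2.foldl (fun s e => PySem.Set.add s e) s) PySem.Set.empty)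
      ↔ (allergies.any (fun p => p.2.contains kv.1) = true) := by
    rw [pv_mem_nested_foldl]
    simp [PySem.Set.empty, List.any_eq_true]
  exact if_congr (not_congr hmem) rfl rfl
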